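/-
  fixed/jsmn_s.bin (-DJSMN_STRICT -DJSMN_PARENT_LINKS): **THE CHECKING `jsmn_parse`** (157 bytes at 10062EH, 53 instructions, one loop, one call)
  **computes `Jsmn.parseFixed`** — for every parser struct and every token array of `num_tokens` entries: NO precondition on the parser's fields or on
  the tokens' parent links, no fuel.
    chk_entry   10062EH → a failed check (`mov eax, -2 ; ret`, nothing written) | 100692H (counting mode: all checks passed) | the loop head 100675H with k = 0
    chk_body    100675H, `for (k = 0; k < toknext; k++) if (tokens[k].parent < -1 || tokens[k].parent >= (int)k) return JSMN_ERROR_INVAL;`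
                one trip: invariant `linksOk ts k`; → a failed check | 100692H with `linksOk ts toknext` | the head with k + 1
    chk_pass    100692H with `argsOk = true`: `argsOk_inv` gives the body's precondition `Inv`; the arguments back into rdi / rsi / rdx;
                `call jsmn_parse_core` through its contract (`CoreSpec binFSc n`) with `js.length + 1` units of fuel; `ret`
  Registers: r9 = parser, r10 = js, rdi = len (parked by the first three instructions), rcx = tokens, r8d = num_tokens, esi = toknext, eax = k.
-/
import Prog.Jsmn.Fixed.CheckLemmas
import Prog.Jsmn.Fixed.CodeFS
import Prog.Jsmn.D.ParseLemmas
import Prog.Jsmn.D.ParseCallLemmas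
import X86.Derived.Prog.MemWords
import X86.Derived.Prog.Reach

namespace X86
namespace J6
namespace FS
open X86.User (CodeAt RegsKept Span FlagsOK Layout toNat_add_ofNat toNat_ofNat_lt' add_ofNat_add)
open Jsmn JsmnFSBytes

set_option maxRecDepth 100000
set_option maxHeartbeats 4000000
set_option linter.unusedSimpArgs false
set_option linter.unusedVariables false

/-- Anywhere in the wrapper after its first three instructions: nothing written, the stack pointer where it was, the arguments parked in
r9 (parser), r10 (js), rdi (len); rcx (tokens), r8 (num_tokens) and the callee-saved registers untouched. -/
structure ChkFrame (v0 : User.State) (pa jsA tb : Word) (len : Nat) (v : User.State) : Prop where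
  mem : v.mem = v0.mem
  rsp : v.reg .rsp = v0.reg .rsp
  r9 : v.reg .r9 = pa
  r10 : v.reg .r10 = jsA
  rdi : v.reg .rdi = UInt64.ofNat len
  rcx : v.reg .rcx = tb
  r8 : v.reg .r8 = v0.reg .r8
  rbx : v.reg .rbx = v0.reg .rbx
  rbp : v.reg .rbp = v0.reg .rbp
  r12 : v.reg .r12 = v0.reg .r12
  r13 : v.reg .r13 = v0.reg .r13
  r14 : v.reg .r14 = v0.reg .r14
  r15 : v.reg .r15 = v0.reg .r15

/-- The arithmetic part of the check with a token array (everything but the loop over the parent links). -/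
def Arith (len : Nat) (p : Parser) (numTokens : Nat) : Prop :=
  len ≤ 2147483647 ∧ p.toknext ≤ 2147483647 - len ∧ numTokens ≤ 2147483647 ∧ p.toknext ≤ numTokens ∧ -1 ≤ p.toksuper ∧
    p.toksuper < (p.toknext : Int)

variable {n : User.Layout} {v0 : User.State} {ret pa jsA tb : Word} {js : List UInt8} {numTokens : Nat} {p p' : Parser} {toks toks' : Option Tokens} {r : Int}

/-- A register of a setter nest: by projection, then (if the walk has not already rewritten with it) the frame fact `h`. -/
macro "regs_by " h:term : tactic => `(tactic| first | (v3_regnorm; done) | (v3_regnorm; exact $h))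

set_option hygiene false in
/-- The end of a failed check, from a view `v` with `ChkFrame` (opened as `hf_…`): eax = -2, back at the caller, nothing written. -/
macro "chk_fail " t:term ", " h:term : tactic => `(tactic| (
  have hbad : ¬ argsOk Config.strictLinks js.length p $t numTokens = true := $h
  rw [Fx.parseFixed_fail hbad] at hm
  simp only [Option.some.injEq, Prod.mk.injEq] at hm
  obtain ⟨rfl, rfl, rfl⟩ := hm
  refine Reach.done ⟨⟨by simp, by first | (v3_regnorm; done) | (v3_regnorm; rw [hf_rsp]), calleeSaved_of_six (by regs_by hf_rbx) (by regs_by hf_rbp) (by regs_by hf_r12)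
      (by regs_by hf_r13) (by regs_by hf_r14) (by regs_by hf_r15),
      by v3_memnorm; first | exact SameOutside.refl _ _ | (rw [hf_mem]; exact SameOutside.refl _ _)⟩,
    by unfold RetInt; v3_regnorm; rfl, by v3_memnorm; first | exact hp.parser | (rw [hf_mem]; exact hp.parser),
    by v3_memnorm; first | exact hp.toksArg | (rw [hf_mem]; exact hp.toksArg)⟩))

/-- **All checks passed**: the arguments go back to their registers, `call jsmn_parse_core` (through its contract), `ret`. -/
theorem chk_pass (hcore : CoreSpec binFSc n)
    (hp : ScanPre binFS n binFS.parse binFS.useParse v0 ret pa jsA tb js numTokens p toks)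
    (hr8 : Word.low .w32 (v0.reg .r8) = UInt64.ofNat numTokens)
    (hok : argsOk Config.strictLinks js.length p toks numTokens = true)
    (hm : parseFixed Config.strictLinks js p toks numTokens = some (r, p', toks'))
    {v : User.State} (hrip : v.rip = 0x100692) (hf : ChkFrame v0 pa jsA tb js.length v) :
    Reach n v (ScanPost binFS binFS.useParse v0 ret pa tb numTokens toks r p' toks') := by
  have hty := typed_of hp.parser hp.nlt
  have hlen := toksArg_len hp.toksArg
  have hW := hp.toksW
  v3_open hp hW hf
  j6f_bin
  rw [Fx.parseFixed_pass hok] at hm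
  obtain ⟨hinv, hl31, _⟩ := argsOk_inv hty hlen hok
  have hsp8 : (v0.reg .rsp - 8).toNat = (v0.reg .rsp).toNat - 8 := by v3_omega
  have himg : CodeAt v.mem 0x100000 image_bytes := by rw [hf_mem]; exact hp_call_img
  have hcode := JsmnFS.tjfs_jsmn_parse_code himg
  have htext : CodeAt v.mem jsA js := by rw [hf_mem]; exact hp_text
  have hpar : ParserAt v.mem pa p := by rw [hf_mem]; exact hp.parser
  have hta : ToksArg Config.strictLinks v.mem tb numTokens toks := by rw [hf_mem]; exact hp_toksArg
  have hretv : UInt64.ofNat (v.mem.readLE (v0.reg .rsp) 8) = ret := by rw [hf_mem]; exact hp_call_retAddr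
  have hcall : CallPre n 0x100000 image_bytes 0x10062e 104 ret v0 := hp.call
  v3_walk hcode hp.call.fetch []
  refine Reach.trans (hcore _ 0x1006a0 pa jsA tb js numTokens p toks (js.length + 1) r p' toks'
    ⟨by show CallPre n 0x100000 image_bytes 0x1002a9 96 _ _; v3_callpre himg hp.call, by regs_by hf_r9, by regs_by hf_r10,
      by regs_by hf_rdi, by regs_by hf_rcx, hp.nlt, hp.jslt, by v3_frame htext, by v3_frame hpar,
      by show ToksArg Config.strictLinks _ tb numTokens toks; v3_frame hta,
      Fx.env_sub hp.env rfl (by v3_regnorm; (try rw [hf_rsp]); v3_omega) (by decide)⟩ (by v3_regnorm; (try rw [hf_r8]); exact hr8) hinv hm) ?_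
  intro v2 hpost
  v3_open hpost
  have hk := hpost.ret.kept
  v3_viewnorm at hpost_ret_rsp hpost_ret_same hpost_ret_rip
  j6f_bin
  unfold dataWins at hpost_ret_same
  try rw [hf_rsp] at hpost_ret_rsp
  try rw [hf_rsp] at hpost_ret_same
  try v3_viewnorm at hpost_ret_rsp hpost_ret_same
  rw [hsp8] at hpost_ret_same
  have hcode2 : CodeAt v2.mem 0x10062e jsmn_parse_bytes := by v3_frame hcodeW
  have hret2 : UInt64.ofNat (v2.mem.readLE (v0.reg .rsp) 8) = ret := by v3_frame hretv
  clear hcodeW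
  v3_walk hcode2 hp.call.fetch [hret2, hp_call_retlt]
  refine Reach.done ⟨⟨by simp, by v3_regnorm, calleeSaved_of_six ?_ ?_ ?_ ?_ ?_ ?_, ?_⟩, ?_, ?_, ?_⟩
  · v3_regnorm; rw [hk.get _ rfl]; regs_by hf_rbx
  · v3_regnorm; rw [hk.get _ rfl]; regs_by hf_rbp
  · v3_regnorm; rw [hk.get _ rfl]; regs_by hf_r12
  · v3_regnorm; rw [hk.get _ rfl]; regs_by hf_r13
  · v3_regnorm; rw [hk.get _ rfl]; regs_by hf_r14
  · v3_regnorm; rw [hk.get _ rfl]; regs_by hf_r15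
  · unfold dataWins
    rw [binFS_cfg]
    v3_memnorm
    have h1 : SameOutside v0.mem (v.mem.writeLE (v0.reg .rsp - 8) 8 1050272)
        [((v0.reg .rsp).toNat - 104, (v0.reg .rsp).toNat), (pa.toNat, pa.toNat + 12),
          (tb.toNat, tb.toNat + toksBytes Config.strictLinks numTokens toks)] := by rw [hf_mem]; v3_same
    refine h1.trans (hpost_ret_same.mono ?_)
    intro a ha
    simp only [outside_cons, outside_nil, and_true] at ha ⊢
    omega
  · unfold RetInt; v3_regnorm; exact hpost.rax
  · v3_memnorm; exact hpost.parser
  · v3_memnorm; exact hpost.toks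

/-- The address of `tokens[i]` (20-byte tokens). -/
theorem tokAddr20 (tb : Word) (i : Nat) : tokAddr Config.strictLinks tb i = tb + UInt64.ofNat (20 * i) := by
  unfold tokAddr; rw [tokSize_strictLinks]

/-- The loop head (100675H) with `m` trips to go: `k = toknext - m` in eax, toknext in esi, `linksOk ts k` so far. -/
def ChkInv (v0 : User.State) (pa jsA tb : Word) (len : Nat) (p : Parser) (ts : Tokens) (m : Nat) (v : User.State) : Prop :=
  ∃ k, m + k = p.toknext ∧ v.rip = 0x100675 ∧ ChkFrame v0 pa jsA tb len v ∧ v.reg .rsi = UInt64.ofNat p.toknext ∧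
    v.reg .rax = UInt64.ofNat k ∧ linksOk ts k = true

/-- **The entry**: the arithmetic checks. A failed check returns JSMN_ERROR_INVAL; in counting mode the body is called; with a token array the loop
over the parent links starts with `k = 0`. -/
theorem chk_entry (hcore : CoreSpec binFSc n)
    (hp : ScanPre binFS n binFS.parse binFS.useParse v0 ret pa jsA tb js numTokens p toks)
    (hr8 : Word.low .w32 (v0.reg .r8) = UInt64.ofNat numTokens)
    (hm : parseFixed Config.strictLinks js p toks numTokens = some (r, p', toks')) :
    Reach n v0 (fun v => ScanPost binFS binFS.useParse v0 ret pa tb numTokens toks r p' toks' v ∨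
      ∃ ts, toks = some ts ∧ Arith js.length p numTokens ∧ ChkInv v0 pa jsA tb js.length p ts p.toknext v) := by
  have hty := typed_of hp.parser hp.nlt
  have hW := hp.toksW
  have hr8n : (v0.reg .r8).toNat % 4294967296 = numTokens := by
    have h := congrArg UInt64.toNat hr8
    have := hp.nlt
    v3_omega
  v3_open hp hW
  j6f_bin
  have hcode := JsmnFS.tjfs_jsmn_parse_code hp_call_img
  obtain ⟨hsraw, hslo, hshi⟩ := hp_parser_toksuper
  have htn := hty.toknext
  have hnt := hp.nlt
  unfold u32 at hsraw
  have j1 : ((233 : Nat) == 235) = false := by decide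
  have j2 : ((233 : UInt8) == 235) = false := by decide
  have j3 : ((233 : UInt64) == 235) = false := by decide
  -- the frame facts of the entry view itself, for `chk_fail`
  have hf_rsp : v0.reg .rsp = v0.reg .rsp := rfl
  have hf_mem : v0.mem = v0.mem := rfl
  have hf_rbx : v0.reg .rbx = v0.reg .rbx := rfl
  have hf_rbp : v0.reg .rbp = v0.reg .rbp := rfl
  have hf_r12 : v0.reg .r12 = v0.reg .r12 := rfl
  have hf_r13 : v0.reg .r13 = v0.reg .r13 := rfl
  have hf_r14 : v0.reg .r14 = v0.reg .r14 := rfl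
  have hf_r15 : v0.reg .r15 = v0.reg .r15 := rfl
  cases toks with
  | none =>
    have htb : tb = 0 := hp_toksArg
    v3_walk hcode hp.call.fetch [hp_call_retAddr, hp_call_retlt, j1, j2, j3] until [0x100692, 0x100675]
    · refine Reach.mono ?_ (fun _ h => Or.inl h)
      chk_fail none, (fun h => by have := (Fx.argsOk_none_iff _ _ _ _).mp h; v3_omega)
    · have hok : argsOk Config.strictLinks js.length p none numTokens = true := (Fx.argsOk_none_iff _ _ _ _).mpr (by v3_omega)
      refine (chk_pass hcore hp hr8 hok hm (by simp) ⟨by simp, by v3_regnorm, by regs_by hp_rdi, by regs_by hp_rsi, by regs_by hp_rdx, by regs_by hp_rcx,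
        by v3_regnorm, by v3_regnorm, by v3_regnorm, by v3_regnorm, by v3_regnorm, by v3_regnorm, by v3_regnorm⟩).mono (fun _ h => Or.inl h)
  | some ts =>
    have htb : tb ≠ 0 := hp_toksArg.1
    have htbn : tb.toNat ≠ 0 := fun h => htb (UInt64.toNat_inj.mp h)
    v3_walk hcode hp.call.fetch [hp_call_retAddr, hp_call_retlt, j1, j2, j3] until [0x100692, 0x100675]
    · refine Reach.mono ?_ (fun _ h => Or.inl h)
      chk_fail (some ts), (fun h => by obtain ⟨a1, a2, a3, a4, a5, a6, -⟩ := (Fx.argsOk_links_iff _ _ _ _).mp h; clear h; v3_omega)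
    · refine Reach.mono ?_ (fun _ h => Or.inl h)
      chk_fail (some ts), (fun h => by obtain ⟨a1, a2, a3, a4, a5, a6, -⟩ := (Fx.argsOk_links_iff _ _ _ _).mp h; clear h; v3_omega)
    · refine Reach.mono ?_ (fun _ h => Or.inl h)
      chk_fail (some ts), (fun h => by obtain ⟨a1, a2, a3, a4, a5, a6, -⟩ := (Fx.argsOk_links_iff _ _ _ _).mp h; clear h; v3_omega)
    · refine Reach.mono ?_ (fun _ h => Or.inl h)
      chk_fail (some ts), (fun h => by obtain ⟨a1, a2, a3, a4, a5, a6, -⟩ := (Fx.argsOk_links_iff _ _ _ _).mp h; clear h; v3_omega)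
    · refine Reach.mono ?_ (fun _ h => Or.inl h)
      chk_fail (some ts), (fun h => by obtain ⟨a1, a2, a3, a4, a5, a6, -⟩ := (Fx.argsOk_links_iff _ _ _ _).mp h; clear h; v3_omega)
    · -- the loop head, k = 0
      have harith : Arith js.length p numTokens := by unfold Arith; v3_omega
      refine Reach.done (Or.inr ⟨ts, rfl, harith, 0, by omega, by simp, ⟨by simp, by v3_regnorm, by regs_by hp_rdi, by regs_by hp_rsi, by regs_by hp_rdx,
        by regs_by hp_rcx, by v3_regnorm, by v3_regnorm, by v3_regnorm, by v3_regnorm, by v3_regnorm, by v3_regnorm, by v3_regnorm⟩, ?_, by v3_regnorm; rfl,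
        Fx.linksOk_zero ts⟩)
      v3_regnorm
      exact Word.low32_ofNat_of_lt htn

/-- **One trip round the loop over the parent links**, at the head with `k = toknext - m`: out (a failed check, or all checks passed and the body
called), or back at the head with `k + 1`. -/
theorem chk_body (hcore : CoreSpec binFSc n) {ts : Tokens}
    (hp : ScanPre binFS n binFS.parse binFS.useParse v0 ret pa jsA tb js numTokens p (some ts))
    (hr8 : Word.low .w32 (v0.reg .r8) = UInt64.ofNat numTokens)
    (hm : parseFixed Config.strictLinks js p (some ts) numTokens = some (r, p', toks'))
    (harith : Arith js.length p numTokens) (m : Nat) (v : User.State) (hi : ChkInv v0 pa jsA tb js.length p ts m v) :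
    Reach n v (fun v' => ScanPost binFS binFS.useParse v0 ret pa tb numTokens (some ts) r p' toks' v' ∨
      ∃ m', m' < m ∧ ChkInv v0 pa jsA tb js.length p ts m' v') := by
  obtain ⟨k, hmk, hrip, hf, hrsi, hrax, hlk⟩ := hi
  obtain ⟨h1, h2, h3, h4, h5, h6⟩ := harith
  have hty := typed_of hp.parser hp.nlt
  have hR := hp.toksRegion
  have hW := hp.toksW
  v3_open hp hW hR hf
  j6f_bin
  obtain ⟨htb, hlen, hts⟩ := hp_toksArg
  simp only [toksBytes, tokSize_strictLinks] at *
  have himg : CodeAt v.mem 0x100000 image_bytes := by rw [hf_mem]; exact hp_call_img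
  have hcode := JsmnFS.tjfs_jsmn_parse_code himg
  have hretv : UInt64.ofNat (v.mem.readLE (v0.reg .rsp) 8) = ret := by rw [hf_mem]; exact hp_call_retAddr
  have htn := hty.toknext
  have hklt : k < 4294967296 := by omega
  have hlowk := Word.low32_ofNat_of_lt (n := k) hklt
  have hlown := Word.low32_ofNat_of_lt (n := p.toknext) htn
  have j1 : ((233 : Nat) == 235) = false := by decide
  have j2 : ((233 : UInt8) == 235) = false := by decide
  have j3 : ((233 : UInt64) == 235) = false := by decide
  rcases m with _ | m
  · -- k = toknext: every parent link is in order, all checks passed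
    have hk : k = p.toknext := by omega
    v3_walk hcode hp.call.fetch [hlowk, hlown, hretv, hp_call_retlt, j1, j2, j3] until [0x100692, 0x100675]
    have hok : argsOk Config.strictLinks js.length p (some ts) numTokens = true :=
      (Fx.argsOk_links_iff _ _ _ _).mpr ⟨h1, h2, h3, h4, h5, h6, hk ▸ hlk⟩
    refine (chk_pass hcore hp hr8 hok hm (by simp) ⟨by simp; exact hf_mem, by regs_by hf_rsp, by regs_by hf_r9, by regs_by hf_r10, by regs_by hf_rdi,
      by regs_by hf_rcx, by regs_by hf_r8, by regs_by hf_rbx, by regs_by hf_rbp, by regs_by hf_r12, by regs_by hf_r13, by regs_by hf_r14,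
      by regs_by hf_r15⟩).mono (fun _ h => Or.inl h)
  · -- tokens[k].parent is read
    have hkl : k < ts.length := by omega
    have ht := hts.getD k hkl
    rw [tokAddr20] at ht
    obtain ⟨hpraw, hplo, hphi⟩ := ht.parent links_strictLinks
    rw [← hf_mem] at hpraw
    unfold u32 at hpraw
    have hlea := lea20_ofNat k (by omega)
    v3_walk hcode hp.call.fetch [hlowk, hlown, hlea, hretv, hp_call_retlt, j1, j2, j3] until [0x100692, 0x100675]
    · -- parent < -1
      refine Reach.mono ?_ (fun _ h => Or.inl h)
      chk_fail (some ts), (fun h => by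
        obtain ⟨-, -, -, -, -, -, hl⟩ := (Fx.argsOk_links_iff _ _ _ _).mp h
        exact Fx.linksOk_false ts k p.toknext (by omega) (fun hc => by obtain ⟨c1, c2⟩ := hc; clear h hl; v3_omega) hl)
    · -- -1 ≤ parent < k: the next token
      have hpk : -1 ≤ (ts.getD k default).parent ∧ (ts.getD k default).parent < (k : Int) := by constructor <;> v3_omega
      refine Reach.done (Or.inr ⟨m, by omega, k + 1, by omega, by simp, ⟨by simp; exact hf_mem, by regs_by hf_rsp, by regs_by hf_r9, by regs_by hf_r10,
        by regs_by hf_rdi, by regs_by hf_rcx, by regs_by hf_r8, by regs_by hf_rbx, by regs_by hf_rbp, by regs_by hf_r12, by regs_by hf_r13,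
        by regs_by hf_r14, by regs_by hf_r15⟩, by regs_by hrsi, ?_, (Fx.linksOk_succ ts k).mpr ⟨hlk, hpk⟩⟩)
      v3_regnorm
      apply UInt64.toNat_inj.mp
      v3_omega
    · -- parent ≥ k
      refine Reach.mono ?_ (fun _ h => Or.inl h)
      chk_fail (some ts), (fun h => by
        obtain ⟨-, -, -, -, -, -, hl⟩ := (Fx.argsOk_links_iff _ _ _ _).mp h
        exact Fx.linksOk_false ts k p.toknext (by omega) (fun hc => by obtain ⟨c1, c2⟩ := hc; clear h hl; v3_omega) hl)

/-- **The fixed `jsmn_parse` of fixed/jsmn_s.bin computes `Jsmn.parseFixed`**, given the contract of the unchanged body. -/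
theorem parse_fixed_spec (hcore : CoreSpec binFSc n) : ParseSpecFixed binFS n := by
  intro v0 ret pa jsA tb js numTokens p toks r p' toks' hp hr8 hm
  have hm' : parseFixed Config.strictLinks js p toks numTokens = some (r, p', toks') := hm
  refine (chk_entry hcore hp hr8 hm').trans ?_
  intro v h
  rcases h with h | ⟨ts, rfl, harith, hinv⟩
  · exact Reach.done h
  · exact Reach.loopOn (chk_body hcore hp hr8 hm' harith) p.toknext v hinv

end FS
end J6
end X86
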